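-- pv_equiv track=rewrite | github.com/LeonardDavid/NetDrift | metrics/count_len/count_len_endlen.py | sum_endlen_old
-- ===== SOURCE A (Python) =====
-- def sum_endlen_old(block_gr):
--     # using a sliding window of size 3, sum up lengths form block_gr, alternating the signs
--
--     endlen_gr = []
--
--     for i in range(len(block_gr)):
--         sum_gr = []
--
--         for j in range(1, len(block_gr[i])-1): # ignore edges since they are missing one neighbour
--             sum_gr.append(abs(block_gr[i][j-1])+abs(block_gr[i][j])+abs(block_gr[i][j+1]))
--
--         endlen_gr.append(sum_gr)
--
--     return endlen_gr
-- ===== SOURCE B (Python) =====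
-- def sum_endlen_old(block_gr):
--     # Incremental sliding window: maintain a running 3-window sum per row
--     # instead of re-adding three terms at every position.
--     out = []
--     for row in block_gr:
--         a = [abs(x) for x in row]
--         if len(a) < 3:
--             out.append([])
--             continue
--         s = a[0] + a[1] + a[2]
--         sums = [s]
--         for k in range(3, len(a)):
--             s += a[k] - a[k - 3]
--             sums.append(s)
--         out.append(sums)
--     return out
-- ===== Notes on version B (the rewrite author's own statement) =====
-- stated objective: alternative
-- what changed: Per row the three-term window sum is maintained incrementally (add the entering element, subtract the leaving one) over a precomputed absolute-value list, instead of re-adding three indexed terms at every position.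
import Mathlib
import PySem

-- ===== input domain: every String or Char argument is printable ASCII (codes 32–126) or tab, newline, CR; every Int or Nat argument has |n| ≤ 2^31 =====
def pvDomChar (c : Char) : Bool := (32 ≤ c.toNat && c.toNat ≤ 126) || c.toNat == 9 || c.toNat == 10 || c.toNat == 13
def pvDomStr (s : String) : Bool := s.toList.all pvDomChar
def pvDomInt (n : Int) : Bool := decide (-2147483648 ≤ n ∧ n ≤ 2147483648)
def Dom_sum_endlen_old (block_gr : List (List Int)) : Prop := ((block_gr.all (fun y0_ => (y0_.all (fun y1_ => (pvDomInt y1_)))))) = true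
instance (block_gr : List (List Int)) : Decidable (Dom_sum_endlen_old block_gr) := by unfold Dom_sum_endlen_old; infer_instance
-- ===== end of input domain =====

-- B maintains the 3-window sum per row incrementally over a precomputed absolute-value
-- list (objective: alternative decomposition); A re-adds three indexed terms per position.


-- ===== PORT A =====
-- inner loop of A: for j in range(1, len(row)-1): sum_gr.append(abs(row[j-1])+abs(row[j])+abs(row[j+1]))
-- indices j-1, j, j+1 are provably in range, so row[..] is ported as pyGetD _ _ 0 (exact here)
def pvARow (row : List Int) : List Int :=
  (PySem.List.pyRange 1 ((row.length : Int) - 1) 1).foldl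
    (fun sum_gr j =>
      sum_gr ++ [|PySem.List.pyGetD row (j - 1) 0| + |PySem.List.pyGetD row j 0| +
                 |PySem.List.pyGetD row (j + 1) 0|]) []

def sum_endlen_old (block_gr : List (List Int)) : List (List Int) :=
  block_gr.foldl (fun endlen_gr row => endlen_gr ++ [pvARow row]) []

-- ===== PORT B =====
-- inner body of B: abs list, seed s = a[0]+a[1]+a[2], then s += a[k] - a[k-3]
def pvBRow (row : List Int) : List Int :=
  let a := row.map (fun x => |x|)
  if a.length < 3 then []
  else
    let s0 := PySem.List.pyGetD a 0 0 + PySem.List.pyGetD a 1 0 + PySem.List.pyGetD a 2 0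
    ((PySem.List.pyRange 3 (a.length : Int) 1).foldl
      (fun (st : Int × List Int) k =>
        let s := st.1 + PySem.List.pyGetD a k 0 - PySem.List.pyGetD a (k - 3) 0
        (s, st.2 ++ [s]))
      (s0, [s0])).2

def sum_endlen_old_alt (block_gr : List (List Int)) : List (List Int) :=
  block_gr.foldl (fun out row => out ++ [pvBRow row]) []

-- ===== PRECONDITION & SPEC =====
def Spec_sum_endlen_old (block_gr : List (List Int)) (out : List (List Int)) : Prop := out = sum_endlen_old_alt block_gr
instance (block_gr : List (List Int)) (out : List (List Int)) : Decidable (Spec_sum_endlen_old block_gr out) := by unfold Spec_sum_endlen_old; infer_instance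

-- ===== CLAIM (what is proved, stated in full; the proofs are below) =====
def Claim_equal_sum_endlen_old : Prop := ∀ (block_gr : List (List Int)), Dom_sum_endlen_old block_gr → Spec_sum_endlen_old block_gr (sum_endlen_old block_gr)

-- ===== LEMMAS AND PROOFS =====

-- the common specification: the list of 3-window sums of a list
def pvWin : List Int → List Int
  | a :: b :: c :: t => (a + b + c) :: pvWin (b :: c :: t)
  | _ => []

theorem pvWin_short (ys : List Int) (h : ys.length < 3) : pvWin ys = [] := by
  match ys with
  | [] => rfl
  | [_] => rfl
  | [_, _] => rfl
  | _ :: _ :: _ :: _ => simp at h; omega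

theorem pvGetD_shift (x : Int) (ys : List Int) (i : Int) (h : 0 ≤ i) :
    PySem.List.pyGetD (x :: ys) (i + 1) 0 = PySem.List.pyGetD ys i 0 := by
  have h1 : i + 1 = ((i.toNat + 1 : Nat) : Int) := by omega
  have h2 : i = ((i.toNat : Nat) : Int) := by omega
  rw [h1, PySem.List.pyGetD_natCast]
  rw [h2, PySem.List.pyGetD_natCast]
  simp [List.getD]
  have hmax : (max i 0).toNat = i.toNat := by omega
  rw [hmax]

def pvG (ys : List Int) (j : Int) : Int :=
  |PySem.List.pyGetD ys (j - 1) 0| + |PySem.List.pyGetD ys j 0| + |PySem.List.pyGetD ys (j + 1) 0|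

theorem pvG_shift (x : Int) (ys : List Int) (j : Int) (h : 1 ≤ j) :
    pvG (x :: ys) (j + 1) = pvG ys j := by
  unfold pvG
  have e1 : j + 1 - 1 = (j - 1) + 1 := by ring
  have e2 : j + 1 + 1 = (j + 1) + 1 := by ring
  rw [e1, pvGetD_shift x ys (j-1) (by omega), pvGetD_shift x ys j (by omega),
      pvGetD_shift x ys (j+1) (by omega)]

theorem pvMapWin : ∀ ys : List Int,
    (List.range (ys.length - 2)).map (fun (k : Nat) => pvG ys ((k : Int) + 1)) = pvWin (ys.map (fun x => |x|))
  | [] => rfl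
  | [_] => rfl
  | [_, _] => rfl
  | a :: b :: c :: t => by
      have IH := pvMapWin (b :: c :: t)
      have hlen : (a :: b :: c :: t).length - 2 = (t.length + 1) := by simp
      have hlen2 : (b :: c :: t).length - 2 = t.length := by simp
      rw [hlen, List.range_succ_eq_map, List.map_cons, List.map_map]
      show _ = (|a| + |b| + |c|) :: pvWin ((b :: c :: t).map (fun x => |x|))
      congr 1
      · show pvG (a :: b :: c :: t) (((0 : Nat) : Int) + 1) = |a| + |b| + |c|
        unfold pvG
        norm_num
        simp [PySem.List.pyGetD_ofNat']
      · rw [← IH, hlen2]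
        refine List.map_congr_left (fun k _ => ?_)
        show pvG (a :: b :: c :: t) ((Nat.succ k : Int) + 1) = pvG (b :: c :: t) ((k : Int) + 1)
        have e : ((Nat.succ k : Int) + 1) = ((k : Int) + 1) + 1 := by push_cast; ring
        rw [e, pvG_shift a _ ((k : Int) + 1) (by omega)]

theorem pvARow_eq_win (row : List Int) : pvARow row = pvWin (row.map (fun x => |x|)) := by
  unfold pvARow
  rw [PySem.List.foldl_append_singleton_eq_map, PySem.List.pyRange_one]
  have h : ((row.length : Int) - 1 - 1).toNat = row.length - 2 := by omega
  rw [h, List.map_map, List.nil_append, ← pvMapWin row]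
  refine List.map_congr_left (fun k _ => ?_)
  show pvG row (1 + (k : Int)) = pvG row ((k : Int) + 1)
  rw [Int.add_comm]

theorem pvBloop (ys : List Int) : ∀ (n i : Nat) (s : Int) (sums : List Int),
    n = ys.length - i → 3 ≤ i → i ≤ ys.length →
    s = ys.getD (i - 3) 0 + ys.getD (i - 2) 0 + ys.getD (i - 1) 0 →
    ((PySem.List.pyRange (i : Int) (ys.length : Int) 1).foldl
       (fun (st : Int × List Int) k =>
          (st.1 + PySem.List.pyGetD ys k 0 - PySem.List.pyGetD ys (k - 3) 0,
           st.2 ++ [st.1 + PySem.List.pyGetD ys k 0 - PySem.List.pyGetD ys (k - 3) 0])) (s, sums)).2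
      = sums ++ pvWin (ys.drop (i - 2)) := by
  intro n
  induction n with
  | zero =>
      intro i s sums hn h3 hle hs
      have hi : i = ys.length := by omega
      rw [PySem.List.pyRange_one_eq_nil (by omega)]
      have hw : pvWin (ys.drop (i - 2)) = [] := by
        apply pvWin_short
        simp [List.length_drop]
        omega
      simp [hw]
  | succ m IH =>
      intro i s sums hn h3 hle hs
      have hi : i < ys.length := by omega
      rw [PySem.List.pyRange_one_cons (by omega)]
      rw [List.foldl_cons]
      have hgi : PySem.List.pyGetD ys (i : Int) 0 = ys.getD i 0 := PySem.List.pyGetD_natCast ys i 0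
      have hgi3 : PySem.List.pyGetD ys ((i : Int) - 3) 0 = ys.getD (i - 3) 0 := by
        have e : (i : Int) - 3 = ((i - 3 : Nat) : Int) := by omega
        rw [e, PySem.List.pyGetD_natCast]
      have hcast : ((i : Int) + 1) = (((i + 1 : Nat)) : Int) := by push_cast; ring
      simp only [hgi, hgi3, hcast]
      have hs' : s + ys.getD i 0 - ys.getD (i - 3) 0
          = ys.getD (i + 1 - 3) 0 + ys.getD (i + 1 - 2) 0 + ys.getD (i + 1 - 1) 0 := by
        have e1 : i + 1 - 3 = i - 2 := by omega
        have e2 : i + 1 - 2 = i - 1 := by omega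
        have e3 : i + 1 - 1 = i := by omega
        rw [e1, e2, e3, hs]; ring
      rw [IH (i + 1) (s + ys.getD i 0 - ys.getD (i - 3) 0)
            (sums ++ [s + ys.getD i 0 - ys.getD (i - 3) 0]) (by omega) (by omega) (by omega) hs']
      rw [List.append_assoc]
      congr 1
      have d1 : ys.drop (i - 2) = ys[i - 2] :: ys.drop (i - 2 + 1) := List.drop_eq_getElem_cons (by omega)
      have d2 : ys.drop (i - 1) = ys[i - 1] :: ys.drop (i - 1 + 1) := List.drop_eq_getElem_cons (by omega)
      have d3 : ys.drop i = ys[i] :: ys.drop (i + 1) := List.drop_eq_getElem_cons hi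
      have e12 : i - 2 + 1 = i - 1 := by omega
      have e23 : i - 1 + 1 = i := by omega
      have e4 : i + 1 - 2 = i - 1 := by omega
      rw [d1, e12, d2, e23, d3, e4, d2, e23, d3]
      rw [show pvWin (ys[i - 2] :: ys[i - 1] :: ys[i] :: ys.drop (i + 1))
            = (ys[i - 2] + ys[i - 1] + ys[i]) :: pvWin (ys[i - 1] :: ys[i] :: ys.drop (i + 1)) from rfl]
      rw [List.singleton_append]
      congr 1
      have g0 : ys.getD (i - 3) 0 = ys[i - 3] := List.getD_eq_getElem ys 0 (by omega)
      have g1 : ys.getD (i - 2) 0 = ys[i - 2] := List.getD_eq_getElem ys 0 (by omega)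
      have g2 : ys.getD (i - 1) 0 = ys[i - 1] := List.getD_eq_getElem ys 0 (by omega)
      have g3 : ys.getD i 0 = ys[i] := List.getD_eq_getElem ys 0 hi
      rw [hs, g0, g1, g2, g3]; ring

theorem pvBMain : ∀ ys : List Int,
    (if ys.length < 3 then ([] : List Int)
     else ((PySem.List.pyRange 3 (ys.length : Int) 1).foldl
        (fun (st : Int × List Int) k =>
          (st.1 + PySem.List.pyGetD ys k 0 - PySem.List.pyGetD ys (k - 3) 0,
           st.2 ++ [st.1 + PySem.List.pyGetD ys k 0 - PySem.List.pyGetD ys (k - 3) 0]))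
        (PySem.List.pyGetD ys 0 0 + PySem.List.pyGetD ys 1 0 + PySem.List.pyGetD ys 2 0,
         [PySem.List.pyGetD ys 0 0 + PySem.List.pyGetD ys 1 0 + PySem.List.pyGetD ys 2 0])).2)
    = pvWin ys := by
  intro ys
  by_cases h : ys.length < 3
  · rw [if_pos h, pvWin_short ys h]
  · rw [if_neg h]
    have h3 : 3 ≤ ys.length := by omega
    have g0 : ys.getD 0 0 = ys[0] := List.getD_eq_getElem ys 0 (by omega)
    have g1 : ys.getD 1 0 = ys[1] := List.getD_eq_getElem ys 0 (by omega)
    have g2 : ys.getD 2 0 = ys[2] := List.getD_eq_getElem ys 0 (by omega)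
    have hs : PySem.List.pyGetD ys 0 0 + PySem.List.pyGetD ys 1 0 + PySem.List.pyGetD ys 2 0
        = ys.getD ((3 : Nat) - 3) 0 + ys.getD ((3 : Nat) - 2) 0 + ys.getD ((3 : Nat) - 1) 0 := by
      rw [PySem.List.pyGetD_ofNat' ys 0 0, PySem.List.pyGetD_ofNat' ys 1 0,
          PySem.List.pyGetD_ofNat' ys 2 0]
    have key := pvBloop ys (ys.length - 3) 3
      (PySem.List.pyGetD ys 0 0 + PySem.List.pyGetD ys 1 0 + PySem.List.pyGetD ys 2 0)
      [PySem.List.pyGetD ys 0 0 + PySem.List.pyGetD ys 1 0 + PySem.List.pyGetD ys 2 0]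
      (by omega) (by omega) h3 hs
    norm_num at key
    rw [key]
    have d0 : ys = ys[0] :: ys.drop 1 := by
      have := List.drop_eq_getElem_cons (l := ys) (show 0 < ys.length by omega)
      rw [List.drop_zero] at this
      exact this
    have d1 : ys.drop 1 = ys[1] :: ys.drop 2 := List.drop_eq_getElem_cons (by omega)
    have d2 : ys.drop 2 = ys[2] :: ys.drop 3 := List.drop_eq_getElem_cons (by omega)
    rw [show ys.tail = ys.drop 1 by rw [List.drop_one]]
    conv_rhs => rw [d0]
    rw [d1, d2]
    simp only [pvWin]
    congr 1
    rw [PySem.List.pyGetD_ofNat' ys 0 0, PySem.List.pyGetD_ofNat' ys 1 0,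
        PySem.List.pyGetD_ofNat' ys 2 0, g0, g1, g2]

theorem pvBRow_eq_win (row : List Int) : pvBRow row = pvWin (row.map (fun x => |x|)) := by
  exact pvBMain (row.map (fun x => |x|))

-- ===== VERDICT (by name: the statement is the Claim_ definition above) =====
theorem sum_endlen_old_spec : Claim_equal_sum_endlen_old := by
  intro block_gr _
  unfold Spec_sum_endlen_old sum_endlen_old sum_endlen_old_alt
  rw [PySem.List.foldl_append_singleton_eq_map, PySem.List.foldl_append_singleton_eq_map]
  exact List.map_congr_left (fun row _ => (pvARow_eq_win row).trans (pvBRow_eq_win row).symm)
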